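-- pv_equiv track=rewrite | github.com/rossop/AdventOfCode | 2021/solutions/17.py | can_land_dx
-- ===== SOURCE A (Python) =====
-- def can_land_dx(step: int, minx: int, maxx: int) -> bool:
--     """Check if it cal land on platform"""
--     for dx in range(1, maxx):
--         x: int = 0
--         for _ in range(step):
--             x += dx
--             if dx > 0:
--                 dx -= 1
--         if minx <= x <= maxx:
--             return True
--     return False
-- ===== SOURCE B (Python) =====
-- def can_land_dx(step: int, minx: int, maxx: int) -> bool:
--     """Check if it can land on platform (closed-form distance per dx)."""
--     def dist(dx: int) -> int:
--         if step <= 0: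
--             return 0
--         if step >= dx:
--             return dx * (dx + 1) // 2
--         return dx * step - step * (step - 1) // 2
--     return any(minx <= dist(dx) <= maxx for dx in range(1, maxx))
-- ===== Notes on version B (the rewrite author's own statement) =====
-- stated objective: faster
-- what changed: Replaces the inner step-by-step drag simulation with a closed-form triangular-number formula for the distance reached by each initial dx, leaving a single pass over dx.
import Mathlib
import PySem

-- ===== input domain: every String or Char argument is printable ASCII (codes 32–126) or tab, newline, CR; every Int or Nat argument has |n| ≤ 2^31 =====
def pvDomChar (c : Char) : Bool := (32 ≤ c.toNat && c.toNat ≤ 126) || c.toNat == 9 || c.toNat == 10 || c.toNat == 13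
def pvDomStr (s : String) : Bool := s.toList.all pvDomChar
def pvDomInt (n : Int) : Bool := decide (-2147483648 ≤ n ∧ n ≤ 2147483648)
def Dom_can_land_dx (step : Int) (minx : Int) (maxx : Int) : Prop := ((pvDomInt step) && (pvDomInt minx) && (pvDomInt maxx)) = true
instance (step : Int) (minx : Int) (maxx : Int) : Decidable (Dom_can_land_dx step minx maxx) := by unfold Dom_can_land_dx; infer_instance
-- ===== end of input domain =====

-- B replaces A's per-step drag simulation with a closed-form triangular-number
-- distance formula per dx (objective: faster, O(maxx) instead of O(maxx*step)).

-- ===== PORT A =====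
-- inner loop body: x += dx; if dx > 0: dx -= 1   (state = (x, dx))
def pvAStep (p : Int × Int) : Int × Int :=
  (p.1 + p.2, if p.2 > 0 then p.2 - 1 else p.2)

-- the for-loop over range(1, maxx) with early 'return True' (lazy, as Python's is)
def pvALoop (step : Int) (minx : Int) (maxx : Int) (dx : Int) : Bool :=
  if dx < maxx then
    let x : Int := ((PySem.List.pyRange 0 step 1).foldl (fun p _ => pvAStep p) (0, dx)).1
    if minx ≤ x ∧ x ≤ maxx then true
    else pvALoop step minx maxx (dx + 1)
  else false
termination_by (maxx - dx).toNat
decreasing_by omega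

def can_land_dx (step : Int) (minx : Int) (maxx : Int) : Bool :=
  pvALoop step minx maxx 1

-- ===== PORT B =====
-- closed-form distance travelled after `step` steps starting at velocity dx
def pvBDist (step : Int) (dx : Int) : Int :=
  if step ≤ 0 then 0
  else if step ≥ dx then PySem.Int.floordiv (dx * (dx + 1)) 2
  else dx * step - PySem.Int.floordiv (step * (step - 1)) 2

-- any(... for dx in range(1, maxx)): lazy generator, early exit
def pvBLoop (step : Int) (minx : Int) (maxx : Int) (dx : Int) : Bool :=
  if dx < maxx then
    if minx ≤ pvBDist step dx ∧ pvBDist step dx ≤ maxx then true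
    else pvBLoop step minx maxx (dx + 1)
  else false
termination_by (maxx - dx).toNat
decreasing_by omega

def can_land_dx_alt (step : Int) (minx : Int) (maxx : Int) : Bool :=
  pvBLoop step minx maxx 1

-- ===== PRECONDITION & SPEC =====
def Spec_can_land_dx (step : Int) (minx : Int) (maxx : Int) (out : Bool) : Prop := out = can_land_dx_alt step minx maxx
instance (step : Int) (minx : Int) (maxx : Int) (out : Bool) : Decidable (Spec_can_land_dx step minx maxx out) := by unfold Spec_can_land_dx; infer_instance

-- ===== CLAIM (what is proved, stated in full; the proofs are below) =====
def Claim_equal_can_land_dx : Prop := ∀ (step : Int) (minx : Int) (maxx : Int), Dom_can_land_dx step minx maxx → Spec_can_land_dx step minx maxx (can_land_dx step minx maxx)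

-- ===== LEMMAS AND PROOFS =====

-- triangular number (proof-only helper)
def pvT (a : Int) : Int := a * (a + 1) / 2

theorem pvTwoT (a : Int) : 2 * pvT a = a * (a + 1) := by
  obtain ⟨k, hk⟩ := Int.even_mul_succ_self a
  unfold pvT
  rw [hk]
  omega

theorem pvFoldlConst {σ α : Type} (f : σ → σ) :
    ∀ (l : List α) (init : σ), l.foldl (fun p _ => f p) init = f^[l.length] init := by
  intro l
  induction l with
  | nil => intro init; simp
  | cons a t ih =>
      intro init
      simp [List.foldl_cons, ih, Function.iterate_succ_apply]

theorem pvIter (n : ℕ) : ∀ (x v : Int), 0 ≤ v →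
    pvAStep^[n] (x, v) = (x + pvT v - pvT (max (v - n) 0), max (v - n) 0) := by
  induction n with
  | zero =>
      intro x v hv
      simp [max_eq_left hv]
  | succ n ih =>
      intro x v hv
      rw [Function.iterate_succ_apply]
      by_cases h : v > 0
      · have hstep : pvAStep (x, v) = (x + v, v - 1) := by
          simp [pvAStep, h]
        rw [hstep, ih (x + v) (v - 1) (by omega)]
        have hm : max (v - 1 - (n : Int)) 0 = max (v - ((n : ℕ) + 1 : ℕ)) 0 := by
          push_cast; omega
        have hT : pvT v = pvT (v - 1) + v := by
          have h1 := pvTwoT v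
          have h2 := pvTwoT (v - 1)
          have key : v * (v + 1) = (v - 1) * (v - 1 + 1) + 2 * v := by ring
          omega
        rw [hm]
        simp only [Prod.mk.injEq]
        exact ⟨by omega, trivial⟩
      · have hv0 : v = 0 := by omega
        subst hv0
        have hstep : pvAStep (x, 0) = (x, 0) := by simp [pvAStep]
        rw [hstep, ih x 0 le_rfl]
        have h1 : max (0 - (n : Int)) 0 = 0 := by omega
        have h2 : max (0 - ((n : ℕ) + 1 : ℕ) : Int) 0 = 0 := by push_cast; omega
        rw [h1, h2]

theorem pvDistEq (step dx : Int) (hdx : 1 ≤ dx) :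
    ((PySem.List.pyRange 0 step 1).foldl (fun p _ => pvAStep p) (0, dx)).1 = pvBDist step dx := by
  rw [pvFoldlConst pvAStep, PySem.List.length_pyRange_one]
  rw [pvIter _ 0 dx (by omega)]
  have hlen : ((step - 0).toNat : Int) = max step 0 := by omega
  simp only [hlen]
  unfold pvBDist
  by_cases hs : step ≤ 0
  · have hmax : max dx 0 = dx := by omega
    simp [hs, hmax]
  · have hfd : ∀ a : Int, PySem.Int.floordiv a 2 = a / 2 :=
      fun a => PySem.Int.floordiv_eq_ediv_of_pos (by omega)
    by_cases hsd : step ≥ dx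
    · have hm : max (dx - max step 0) 0 = 0 := by omega
      simp [hs, hsd, pvT]
    · have hm : max (dx - max step 0) 0 = dx - step := by omega
      simp only [hs, hsd, if_false, hm, hfd]
      have h1 := pvTwoT dx
      have h2 := pvTwoT (dx - step)
      have h3 := pvTwoT (step - 1)
      have key : dx * (dx + 1) - (dx - step) * (dx - step + 1)
          = 2 * (dx * step) - (step - 1) * (step - 1 + 1) := by ring
      have hT3 : pvT (step - 1) = (step * (step - 1)) / 2 := by
        unfold pvT; ring_nf
      rw [← hT3]
      omega

theorem pvLoopEq (step minx maxx : Int) (n : ℕ) :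
    ∀ dx : Int, (maxx - dx).toNat = n → 1 ≤ dx →
      pvALoop step minx maxx dx = pvBLoop step minx maxx dx := by
  induction n using Nat.strong_induction_on with
  | _ n ih =>
    intro dx hn hdx
    rw [pvALoop, pvBLoop]
    by_cases h : dx < maxx
    · simp only [if_pos h]
      rw [pvDistEq step dx hdx]
      by_cases hc : minx ≤ pvBDist step dx ∧ pvBDist step dx ≤ maxx
      · simp [hc]
      · simp only [if_neg hc]
        exact ih ((maxx - (dx + 1)).toNat) (by omega) (dx + 1) rfl (by omega)
    · simp [h]

-- ===== VERDICT (by name: the statement is the Claim_ definition above) =====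
theorem can_land_dx_spec : Claim_equal_can_land_dx := by
  intro step minx maxx _
  unfold Spec_can_land_dx can_land_dx can_land_dx_alt
  exact pvLoopEq step minx maxx ((maxx - 1).toNat) 1 rfl le_rfl
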